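-- pv_equiv track=rewrite | github.com/Joseph-Chou911/fred-cache | scripts/update_fallback_cache.py | _pick_nonfin_leverage_field
-- ===== SOURCE A (Python) =====
-- from typing import Dict, List, Optional, Tuple
--
-- def _pick_nonfin_leverage_field(fieldnames: List[str]) -> Optional[str]:
--     if not fieldnames:
--         return None
--
--     known = [
--         "NFCINONFINLEVERAGE",
--         "NFCI_NONFIN_LEVERAGE",
--         "Nonfinancial Leverage Subindex",
--         "Nonfinancial leverage subindex",
--     ]
--     for k in known:
--         if k in fieldnames:
--             return k
--
--     for f in fieldnames:
--         low = f.strip().lower()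
--         if ("nonfinancial" in low and "leverage" in low) or (("non" in low and "fin" in low) and "leverage" in low):
--             return f
--
--     return None
-- ===== SOURCE B (Python) =====
-- from typing import Dict, List, Optional, Tuple
--
-- def _pick_nonfin_leverage_field(fieldnames: List[str]) -> Optional[str]:
--     known = [
--         "NFCINONFINLEVERAGE",
--         "NFCI_NONFIN_LEVERAGE",
--         "Nonfinancial Leverage Subindex",
--         "Nonfinancial leverage subindex",
--     ]
--     rank = {k: i for i, k in enumerate(known)}
--     best = len(known)          # sentinel: no exact match yet
--     fallback = None            # first heuristic match, if any
--     for f in fieldnames: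
--         i = rank.get(f)
--         if i is not None and i < best:
--             best = i
--         if fallback is None:
--             low = f.strip().lower()
--             if "leverage" in low and ("nonfinancial" in low or ("non" in low and "fin" in low)):
--                 fallback = f
--     if best < len(known):
--         return known[best]
--     return fallback
-- ===== Notes on version B (the rewrite author's own statement) =====
-- stated objective: alternative
-- what changed: Replaces A's two sequential scans (priority loop over known names with membership tests, then a heuristic scan) by a single pass over fieldnames that tracks the minimum known-priority index via a name-to-index dict plus the first heuristic fallback, deciding the result after the loop.
import Mathlib
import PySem

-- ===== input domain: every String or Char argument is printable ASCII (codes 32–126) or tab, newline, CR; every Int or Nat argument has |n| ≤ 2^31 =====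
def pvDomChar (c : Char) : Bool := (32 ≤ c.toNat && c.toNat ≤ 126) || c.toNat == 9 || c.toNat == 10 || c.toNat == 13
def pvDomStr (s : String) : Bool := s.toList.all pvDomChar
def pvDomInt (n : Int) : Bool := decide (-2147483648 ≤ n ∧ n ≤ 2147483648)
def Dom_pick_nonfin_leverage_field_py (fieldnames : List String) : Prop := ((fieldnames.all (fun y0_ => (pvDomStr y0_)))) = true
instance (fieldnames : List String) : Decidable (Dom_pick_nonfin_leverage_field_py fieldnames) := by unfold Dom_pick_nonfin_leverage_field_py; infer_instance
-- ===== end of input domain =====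

-- B replaces A's two sequential scans by one pass over fieldnames tracking the
-- minimum known-priority index (via a name→index dict) and the first heuristic
-- fallback; same return value (alternative decomposition, no speed claim).

-- ===== PORT A =====
def pvKnownA : List String :=
  ["NFCINONFINLEVERAGE", "NFCI_NONFIN_LEVERAGE",
   "Nonfinancial Leverage Subindex", "Nonfinancial leverage subindex"]

-- the heuristic test of A's second loop
def pvPredA (f : String) : Bool :=
  let low := PySem.Str.lower (PySem.Str.strip f)
  (PySem.Str.isIn "nonfinancial" low && PySem.Str.isIn "leverage" low) ||
  ((PySem.Str.isIn "non" low && PySem.Str.isIn "fin" low) && PySem.Str.isIn "leverage" low)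

-- 'for k in known: if k in fieldnames: return k'
def pvLoopKnown (fieldnames : List String) : List String → Option String
  | [] => none
  | k :: rest => if fieldnames.contains k then some k else pvLoopKnown fieldnames rest

-- 'for f in fieldnames: … return f'
def pvLoopFallback : List String → Option String
  | [] => none
  | f :: rest => if pvPredA f then some f else pvLoopFallback rest

def pick_nonfin_leverage_field_py (fieldnames : List String) : Option String :=
  if fieldnames = [] then none
  else
    match pvLoopKnown fieldnames pvKnownA with
    | some k => some k
    | none => pvLoopFallback fieldnames

-- ===== PORT B =====
def pvKnownB : List String :=
  ["NFCINONFINLEVERAGE", "NFCI_NONFIN_LEVERAGE",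
   "Nonfinancial Leverage Subindex", "Nonfinancial leverage subindex"]

-- rank = {k: i for i, k in enumerate(known)}
def pvRankB : PySem.Dict String Int :=
  PySem.Dict.ofList ((PySem.List.enumerate pvKnownB).map (fun p => (p.2, p.1)))

-- B's heuristic test ("leverage" factored out)
def pvPredB (f : String) : Bool :=
  let low := PySem.Str.lower (PySem.Str.strip f)
  PySem.Str.isIn "leverage" low &&
    (PySem.Str.isIn "nonfinancial" low ||
      (PySem.Str.isIn "non" low && PySem.Str.isIn "fin" low))

-- one iteration of B's single loop: update (best, fallback)
def pvStepB (st : Int × Option String) (f : String) : Int × Option String :=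
  ( -- best: 'i = rank.get(f); if i is not None and i < best: best = i'
    match pvRankB.get? f with
    | some i => if i < st.1 then i else st.1
    | none => st.1
  , -- fallback: 'if fallback is None: … fallback = f'
    match st.2 with
    | some _ => st.2
    | none => if pvPredB f then some f else none )

def pick_nonfin_leverage_field_py_alt (fieldnames : List String) : Option String :=
  let st := fieldnames.foldl pvStepB ((pvKnownB.length : Int), none)
  if st.1 < (pvKnownB.length : Int) then PySem.List.pyGet? pvKnownB st.1 else st.2

-- ===== PRECONDITION & SPEC =====
def Spec_pick_nonfin_leverage_field_py (fieldnames : List String) (out : Option String) : Prop := out = pick_nonfin_leverage_field_py_alt fieldnames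
instance (fieldnames : List String) (out : Option String) : Decidable (Spec_pick_nonfin_leverage_field_py fieldnames out) := by unfold Spec_pick_nonfin_leverage_field_py; infer_instance

-- ===== CLAIM (what is proved, stated in full; the proofs are below) =====
def Claim_equal_pick_nonfin_leverage_field_py : Prop := ∀ (fieldnames : List String), Dom_pick_nonfin_leverage_field_py fieldnames → Spec_pick_nonfin_leverage_field_py fieldnames (pick_nonfin_leverage_field_py fieldnames)

-- ===== LEMMAS AND PROOFS =====

-- the four known names, abbreviated for the proofs
def pvS0 : String := "NFCINONFINLEVERAGE"
def pvS1 : String := "NFCI_NONFIN_LEVERAGE"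
def pvS2 : String := "Nonfinancial Leverage Subindex"
def pvS3 : String := "Nonfinancial leverage subindex"

-- the priority index of f among the known names (4 = not known)
def pvIdxN (f : String) : Int :=
  if f = pvS0 then 0 else if f = pvS1 then 1
  else if f = pvS2 then 2 else if f = pvS3 then 3 else 4

-- the minimum known-index present in fs (4 = none present)
def pvMspec (fs : List String) : Int :=
  if fs.contains pvS0 then 0
  else if fs.contains pvS1 then 1
  else if fs.contains pvS2 then 2
  else if fs.contains pvS3 then 3
  else 4

-- b, or else the first heuristic match in fs
def pvOrFind (b : Option String) (fs : List String) : Option String :=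
  match b with
  | some x => some x
  | none => fs.find? pvPredB

-- one fallback update
def pvKeepFB (b : Option String) (f : String) : Option String :=
  match b with
  | some x => some x
  | none => if pvPredB f then some f else none

lemma pvMspec_le (fs : List String) : pvMspec fs ≤ 4 := by
  unfold pvMspec; split_ifs <;> omega

lemma pvIdxN_le (f : String) : pvIdxN f ≤ 4 := by
  unfold pvIdxN; split_ifs <;> omega

set_option maxHeartbeats 1000000 in
lemma pvRankB_get? (f : String) :
    pvRankB.get? f =
      if f = pvS0 then some 0 else if f = pvS1 then some 1
      else if f = pvS2 then some 2 else if f = pvS3 then some 3 else none := by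
  split_ifs with h0 h1 h2 h3
  · subst h0; decide
  · subst h1; decide
  · subst h2; decide
  · subst h3; decide
  · rw [PySem.Dict.get?_eq_none_iff_not_mem_keys]
    have hk : pvRankB.keys = [pvS0, pvS1, pvS2, pvS3] := by decide
    rw [hk]; simp [pvS0, pvS1, pvS2, pvS3] at *
    exact ⟨h0, h1, h2, h3⟩

-- the two heuristic tests agree
lemma pvBoolRearrange (a b c d : Bool) :
    (a && b || (c && d) && b) = (b && (a || c && d)) := by
  cases a <;> cases b <;> cases c <;> cases d <;> rfl

lemma pvPred_eq (f : String) : pvPredA f = pvPredB f := by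
  unfold pvPredA pvPredB
  exact pvBoolRearrange _ _ _ _

lemma pvLoopFallback_eq (fs : List String) :
    pvLoopFallback fs = fs.find? pvPredB := by
  induction fs with
  | nil => rfl
  | cons f rest ih =>
    simp only [pvLoopFallback, List.find?_cons, pvPred_eq]
    cases pvPredB f <;> simp [ih]

lemma pvStepB_fst (a : Int) (b : Option String) (f : String) (ha : a ≤ 4) :
    (pvStepB (a, b) f).1 = min a (pvIdxN f) := by
  simp only [pvStepB]
  rw [pvRankB_get?]
  unfold pvIdxN
  split_ifs <;> simp [min_def] <;> (try split_ifs) <;> omega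

lemma pvStepB_snd (a : Int) (b : Option String) (f : String) :
    (pvStepB (a, b) f).2 = pvKeepFB b f := by
  simp only [pvStepB, pvKeepFB]
  cases b <;> rfl

set_option maxHeartbeats 1000000 in
lemma pvIdxN_Mspec (f : String) (rest : List String) :
    min (pvIdxN f) (pvMspec rest) = pvMspec (f :: rest) := by
  unfold pvIdxN pvMspec
  simp only [List.contains_cons, Bool.or_eq_true, beq_iff_eq]
  split_ifs <;> first | omega | simp_all

lemma pvOrFind_step (b : Option String) (f : String) (rest : List String) :
    pvOrFind (pvKeepFB b f) rest = pvOrFind b (f :: rest) := by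
  cases b with
  | some x => rfl
  | none =>
    simp only [pvKeepFB, pvOrFind, List.find?_cons]
    cases pvPredB f <;> simp

-- B's loop invariant
lemma pvFoldl_inv (fs : List String) : ∀ (a : Int) (b : Option String), a ≤ 4 →
    fs.foldl pvStepB (a, b) = (min a (pvMspec fs), pvOrFind b fs) := by
  induction fs with
  | nil =>
    intro a b ha
    have h4 : pvMspec ([] : List String) = 4 := by simp [pvMspec]
    simp only [List.foldl_nil, h4]
    have hmin : min a 4 = a := by omega
    rw [hmin]
    cases b <;> rfl
  | cons f rest ih =>
    intro a b ha
    have hle : min a (pvIdxN f) ≤ 4 := by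
      have := pvIdxN_le f; omega
    have hpair : pvStepB (a, b) f = (min a (pvIdxN f), pvKeepFB b f) :=
      Prod.ext (pvStepB_fst a b f ha) (pvStepB_snd a b f)
    rw [List.foldl_cons, hpair, ih _ _ hle, min_assoc, pvIdxN_Mspec,
        pvOrFind_step]

-- ===== VERDICT (by name: the statement is the Claim_ definition above) =====
set_option maxHeartbeats 1000000 in
set_option maxRecDepth 8192 in
theorem pick_nonfin_leverage_field_py_spec : Claim_equal_pick_nonfin_leverage_field_py := by
  intro fs _
  unfold Spec_pick_nonfin_leverage_field_py
  unfold pick_nonfin_leverage_field_py pick_nonfin_leverage_field_py_alt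
  have hlen : ((pvKnownB.length : Nat) : Int) = 4 := by norm_num [pvKnownB]
  rw [hlen, pvFoldl_inv fs 4 none (by omega)]
  have hmin : min (4 : Int) (pvMspec fs) = pvMspec fs := by
    have := pvMspec_le fs; omega
  by_cases hfs : fs = []
  · subst hfs
    norm_num [pvMspec, pvOrFind]
  · rw [if_neg hfs]
    simp only [pvLoopKnown, pvKnownA, hmin]
    have hOF : pvOrFind none fs = fs.find? pvPredB := rfl
    rw [hOF]
    unfold pvMspec
    simp only [pvS0, pvS1, pvS2, pvS3]
    split_ifs with c0 c1 c2 c3 <;>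
      simp_all [pvLoopFallback_eq, pvKnownB, PySem.List.pyGet?, PySem.List.pyIdx?]
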